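-- pv_equiv track=rewrite | github.com/ashfyx716/WellNest | wellnest_ml/services/rf_service.py | get_risk_factors
-- ===== SOURCE A (Python) =====
-- def _entry_dict(e):
--     if hasattr(e, "model_dump"):
--         return e.model_dump()
--     return e
--
-- def get_risk_factors(history: list) -> list:
--     factors = []
--     poor_sleep = sum(1 for e in history if _entry_dict(e).get("sleep_quality") == "POOR")
--     stressed = sum(
--         1 for e in history if _entry_dict(e).get("mood") in ("STRESSED", "SAD", "TIRED")
--     )
--     inactive = sum(1 for e in history if _entry_dict(e).get("activity") == "NOT_ACTIVE")
--     junk = sum(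
--         1 for e in history if _entry_dict(e).get("diet") in ("JUNK", "SKIPPED")
--     )
--
--     if poor_sleep >= 3:
--         factors.append(f"Poor sleep on {poor_sleep} days 😴")
--     if stressed >= 3:
--         factors.append(f"Difficult moods on {stressed} days 😔")
--     if inactive >= 4:
--         factors.append(f"Inactive on {inactive} days 🛋️")
--     if junk >= 3:
--         factors.append(f"Unhealthy eating on {junk} days 🍕")
--     if not factors:
--         factors.append("Patterns look stable 🌿")
--     return factors
-- ===== SOURCE B (Python) =====
-- def _entry_dict(e):
--     if hasattr(e, "model_dump"):
--         return e.model_dump()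
--     return e
--
-- def get_risk_factors(history: list) -> list:
--     # one pass: compute the entry dict once and keep four counters
--     poor_sleep = stressed = inactive = junk = 0
--     for e in history:
--         d = _entry_dict(e)
--         if d.get("sleep_quality") == "POOR":
--             poor_sleep += 1
--         if d.get("mood") in ("STRESSED", "SAD", "TIRED"):
--             stressed += 1
--         if d.get("activity") == "NOT_ACTIVE":
--             inactive += 1
--         if d.get("diet") in ("JUNK", "SKIPPED"):
--             junk += 1
--
--     factors = []
--     if poor_sleep >= 3:
--         factors.append(f"Poor sleep on {poor_sleep} days 😴")
--     if stressed >= 3: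
--         factors.append(f"Difficult moods on {stressed} days 😔")
--     if inactive >= 4:
--         factors.append(f"Inactive on {inactive} days 🛋️")
--     if junk >= 3:
--         factors.append(f"Unhealthy eating on {junk} days 🍕")
--     if not factors:
--         factors.append("Patterns look stable 🌿")
--     return factors
-- ===== Notes on version B (the rewrite author's own statement) =====
-- stated objective: simpler
-- what changed: Replaced four separate generator passes over history (each re-deriving the entry dict) with one loop that converts each entry once and maintains four integer counters.
import Mathlib
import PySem

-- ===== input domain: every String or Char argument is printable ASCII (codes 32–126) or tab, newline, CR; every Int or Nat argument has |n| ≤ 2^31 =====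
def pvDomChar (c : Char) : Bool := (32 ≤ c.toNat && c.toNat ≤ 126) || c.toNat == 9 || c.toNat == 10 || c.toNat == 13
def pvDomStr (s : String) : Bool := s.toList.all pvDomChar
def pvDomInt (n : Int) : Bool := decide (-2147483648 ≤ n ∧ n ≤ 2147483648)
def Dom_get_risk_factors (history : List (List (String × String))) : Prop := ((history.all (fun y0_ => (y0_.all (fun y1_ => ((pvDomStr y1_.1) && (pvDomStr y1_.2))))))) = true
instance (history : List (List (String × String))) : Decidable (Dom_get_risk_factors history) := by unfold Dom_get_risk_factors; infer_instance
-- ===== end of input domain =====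

-- B makes a single pass keeping four counters instead of A's four separate scans; objective: simpler.

-- ===== PORT A =====
-- _entry_dict: for a plain dict (the ported type) hasattr(e, "model_dump") is False, so it is the identity
def entryDictA (e : List (String × String)) : List (String × String) := e

def get_risk_factors (history : List (List (String × String))) : List String :=
  let poor_sleep : Int :=
    (history.map (fun e => if PySem.Dict.get? (PySem.Dict.ofList (entryDictA e)) "sleep_quality" == some "POOR" then (1:Int) else 0)).sum
  let stressed : Int :=
    (history.map (fun e => if (PySem.Dict.get? (PySem.Dict.ofList (entryDictA e)) "mood" == some "STRESSED" ||
        PySem.Dict.get? (PySem.Dict.ofList (entryDictA e)) "mood" == some "SAD" ||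
        PySem.Dict.get? (PySem.Dict.ofList (entryDictA e)) "mood" == some "TIRED") then (1:Int) else 0)).sum
  let inactive : Int :=
    (history.map (fun e => if PySem.Dict.get? (PySem.Dict.ofList (entryDictA e)) "activity" == some "NOT_ACTIVE" then (1:Int) else 0)).sum
  let junk : Int :=
    (history.map (fun e => if (PySem.Dict.get? (PySem.Dict.ofList (entryDictA e)) "diet" == some "JUNK" ||
        PySem.Dict.get? (PySem.Dict.ofList (entryDictA e)) "diet" == some "SKIPPED") then (1:Int) else 0)).sum
  let factors : List String := []
  let factors := if poor_sleep ≥ 3 then factors ++ ["Poor sleep on " ++ PySem.Int.toStr poor_sleep ++ " days 😴"] else factors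
  let factors := if stressed ≥ 3 then factors ++ ["Difficult moods on " ++ PySem.Int.toStr stressed ++ " days 😔"] else factors
  let factors := if inactive ≥ 4 then factors ++ ["Inactive on " ++ PySem.Int.toStr inactive ++ " days 🛋️"] else factors
  let factors := if junk ≥ 3 then factors ++ ["Unhealthy eating on " ++ PySem.Int.toStr junk ++ " days 🍕"] else factors
  let factors := if factors = [] then factors ++ ["Patterns look stable 🌿"] else factors
  factors

-- ===== PORT B =====
def entryDictB (e : List (String × String)) : List (String × String) := e

def get_risk_factors_alt (history : List (List (String × String))) : List String :=
  let c : Int × Int × Int × Int := history.foldl (fun s e =>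
    let d := entryDictB e
    ( s.1 + (if PySem.Dict.get? (PySem.Dict.ofList d) "sleep_quality" == some "POOR" then (1:Int) else 0),
      s.2.1 + (if (PySem.Dict.get? (PySem.Dict.ofList d) "mood" == some "STRESSED" ||
                   PySem.Dict.get? (PySem.Dict.ofList d) "mood" == some "SAD" ||
                   PySem.Dict.get? (PySem.Dict.ofList d) "mood" == some "TIRED") then (1:Int) else 0),
      s.2.2.1 + (if PySem.Dict.get? (PySem.Dict.ofList d) "activity" == some "NOT_ACTIVE" then (1:Int) else 0),
      s.2.2.2 + (if (PySem.Dict.get? (PySem.Dict.ofList d) "diet" == some "JUNK" ||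
                     PySem.Dict.get? (PySem.Dict.ofList d) "diet" == some "SKIPPED") then (1:Int) else 0) )) (0, 0, 0, 0)
  let factors : List String := []
  let factors := if c.1 ≥ 3 then factors ++ ["Poor sleep on " ++ PySem.Int.toStr c.1 ++ " days 😴"] else factors
  let factors := if c.2.1 ≥ 3 then factors ++ ["Difficult moods on " ++ PySem.Int.toStr c.2.1 ++ " days 😔"] else factors
  let factors := if c.2.2.1 ≥ 4 then factors ++ ["Inactive on " ++ PySem.Int.toStr c.2.2.1 ++ " days 🛋️"] else factors
  let factors := if c.2.2.2 ≥ 3 then factors ++ ["Unhealthy eating on " ++ PySem.Int.toStr c.2.2.2 ++ " days 🍕"] else factors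
  let factors := if factors = [] then factors ++ ["Patterns look stable 🌿"] else factors
  factors

-- ===== PRECONDITION & SPEC =====
def Spec_get_risk_factors (history : List (List (String × String))) (out : List String) : Prop := out = get_risk_factors_alt history
instance (history : List (List (String × String))) (out : List String) : Decidable (Spec_get_risk_factors history out) := by unfold Spec_get_risk_factors; infer_instance

-- ===== CLAIM (what is proved, stated in full; the proofs are below) =====
def Claim_equal_get_risk_factors : Prop := ∀ (history : List (List (String × String))), Dom_get_risk_factors history → Spec_get_risk_factors history (get_risk_factors history)

-- ===== LEMMAS AND PROOFS =====

-- B's single-pass fold equals A's four separate sums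
theorem pv_counters (history : List (List (String × String))) (a b c d : Int) :
    history.foldl (fun s e =>
      let dd := entryDictB e
      ( s.1 + (if PySem.Dict.get? (PySem.Dict.ofList dd) "sleep_quality" == some "POOR" then (1:Int) else 0),
        s.2.1 + (if (PySem.Dict.get? (PySem.Dict.ofList dd) "mood" == some "STRESSED" ||
                     PySem.Dict.get? (PySem.Dict.ofList dd) "mood" == some "SAD" ||
                     PySem.Dict.get? (PySem.Dict.ofList dd) "mood" == some "TIRED") then (1:Int) else 0),
        s.2.2.1 + (if PySem.Dict.get? (PySem.Dict.ofList dd) "activity" == some "NOT_ACTIVE" then (1:Int) else 0),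
        s.2.2.2 + (if (PySem.Dict.get? (PySem.Dict.ofList dd) "diet" == some "JUNK" ||
                       PySem.Dict.get? (PySem.Dict.ofList dd) "diet" == some "SKIPPED") then (1:Int) else 0) )) ((a, b, c, d) : Int × Int × Int × Int)
    = ( a + (history.map (fun e => if PySem.Dict.get? (PySem.Dict.ofList (entryDictA e)) "sleep_quality" == some "POOR" then (1:Int) else 0)).sum,
        b + (history.map (fun e => if (PySem.Dict.get? (PySem.Dict.ofList (entryDictA e)) "mood" == some "STRESSED" ||
              PySem.Dict.get? (PySem.Dict.ofList (entryDictA e)) "mood" == some "SAD" ||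
              PySem.Dict.get? (PySem.Dict.ofList (entryDictA e)) "mood" == some "TIRED") then (1:Int) else 0)).sum,
        c + (history.map (fun e => if PySem.Dict.get? (PySem.Dict.ofList (entryDictA e)) "activity" == some "NOT_ACTIVE" then (1:Int) else 0)).sum,
        d + (history.map (fun e => if (PySem.Dict.get? (PySem.Dict.ofList (entryDictA e)) "diet" == some "JUNK" ||
              PySem.Dict.get? (PySem.Dict.ofList (entryDictA e)) "diet" == some "SKIPPED") then (1:Int) else 0)).sum ) := by
  induction history generalizing a b c d with
  | nil => simp
  | cons e t ih =>
      simp only [List.foldl_cons, List.map_cons, List.sum_cons]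
      rw [ih]
      simp only [entryDictA, entryDictB]
      ring_nf

-- ===== VERDICT (by name: the statement is the Claim_ definition above) =====
theorem get_risk_factors_spec : Claim_equal_get_risk_factors := by
  intro history _
  show get_risk_factors history = get_risk_factors_alt history
  unfold get_risk_factors get_risk_factors_alt
  rw [pv_counters]
  simp
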